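-- pv_equiv track=rewrite | github.com/yizhuoliang/hiresperf | scripts/consolidate.py | extract_tag_times
-- ===== SOURCE A (Python) =====
-- def extract_tag_times(log_entries):
--     tag_set_time = None
--     tag_clear_time = None
--     for time, line in log_entries:
--         if "TAG_SET" in line:
--             tag_set_time = time
--         elif "TAG_CLEAR" in line:
--             tag_clear_time = time
--     return tag_set_time, tag_clear_time
-- ===== SOURCE B (Python) =====
-- def extract_tag_times(log_entries):
--     tag_set_time = None
--     tag_clear_time = None
--     for time, line in reversed(list(log_entries)):
--         if "TAG_SET" in line:
--             if tag_set_time is None: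
--                 tag_set_time = time
--         elif "TAG_CLEAR" in line:
--             if tag_clear_time is None:
--                 tag_clear_time = time
--         if tag_set_time is not None and tag_clear_time is not None:
--             break
--     return tag_set_time, tag_clear_time
-- ===== Notes on version B (the rewrite author's own statement) =====
-- stated objective: alternative
-- what changed: B iterates the materialized entries in reverse, records the first TAG_SET and first TAG_CLEAR hit (TAG_SET-first elif precedence kept) and breaks as soon as both are found, instead of A's full forward scan that overwrites last-seen values.
import Mathlib
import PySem

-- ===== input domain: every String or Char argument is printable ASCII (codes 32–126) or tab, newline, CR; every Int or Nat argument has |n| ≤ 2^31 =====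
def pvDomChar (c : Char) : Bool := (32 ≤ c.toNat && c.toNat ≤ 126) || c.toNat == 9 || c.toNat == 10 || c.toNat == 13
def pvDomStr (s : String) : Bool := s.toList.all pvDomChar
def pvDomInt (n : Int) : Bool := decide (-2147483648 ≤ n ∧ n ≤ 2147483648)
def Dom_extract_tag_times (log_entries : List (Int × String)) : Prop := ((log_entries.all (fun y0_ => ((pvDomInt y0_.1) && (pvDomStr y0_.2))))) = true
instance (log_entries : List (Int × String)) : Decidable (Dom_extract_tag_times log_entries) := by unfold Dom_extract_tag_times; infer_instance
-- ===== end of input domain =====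

-- B re-implements the last-TAG_SET/last-TAG_CLEAR scan as a reverse traversal taking the
-- first hit of each tag with an early break once both are found (alternative decomposition,
-- same asymptotic cost); return-value equivalence proved on the whole domain.


-- ===== PORT A =====
-- A's loop body: overwrite tag_set_time on "TAG_SET", elif overwrite tag_clear_time on "TAG_CLEAR"
def aStep (st : Option Int × Option Int) (e : Int × String) : Option Int × Option Int :=
  if PySem.Str.isIn "TAG_SET" e.2 then (some e.1, st.2)
  else if PySem.Str.isIn "TAG_CLEAR" e.2 then (st.1, some e.1)
  else st

def extract_tag_times (log_entries : List (Int × String)) : Option Int × Option Int :=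
  log_entries.foldl aStep (none, none)

-- ===== PORT B =====
-- B's reverse loop: fill each slot only if still None (elif precedence), break when both filled
def bGo : List (Int × String) → Option Int → Option Int → Option Int × Option Int
  | [], ts, tc => (ts, tc)
  | e :: rest, ts, tc =>
    let p : Option Int × Option Int :=
      if PySem.Str.isIn "TAG_SET" e.2 then
        (if ts.isNone then some e.1 else ts, tc)
      else if PySem.Str.isIn "TAG_CLEAR" e.2 then
        (ts, if tc.isNone then some e.1 else tc)
      else (ts, tc)
    if p.1.isSome && p.2.isSome then p else bGo rest p.1 p.2

def extract_tag_times_alt (log_entries : List (Int × String)) : Option Int × Option Int :=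
  bGo log_entries.reverse none none

-- ===== PRECONDITION & SPEC =====
def Spec_extract_tag_times (log_entries : List (Int × String)) (out : Option Int × Option Int) : Prop := out = extract_tag_times_alt log_entries
instance (log_entries : List (Int × String)) (out : Option Int × Option Int) : Decidable (Spec_extract_tag_times log_entries out) := by unfold Spec_extract_tag_times; infer_instance

-- ===== CLAIM (what is proved, stated in full; the proofs are below) =====
def Claim_equal_extract_tag_times : Prop := ∀ (log_entries : List (Int × String)), Dom_extract_tag_times log_entries → Spec_extract_tag_times log_entries (extract_tag_times log_entries)

-- ===== LEMMAS AND PROOFS =====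
def pS (e : Int × String) : Bool := PySem.Str.isIn "TAG_SET" e.2
def pC (e : Int × String) : Bool := !pS e && PySem.Str.isIn "TAG_CLEAR" e.2

lemma bGo_eq : ∀ (ys : List (Int × String)) (ts tc : Option Int),
    bGo ys ts tc = (ts.or ((ys.find? pS).map (·.1)), tc.or ((ys.find? pC).map (·.1))) := by
  intro ys
  induction ys with
  | nil => intro ts tc; simp [bGo]
  | cons e rest ih =>
    intro ts tc
    by_cases hS : PySem.Str.isIn "TAG_SET" e.2
    · cases ts <;> cases tc <;>
        simp_all [bGo, ih, pS, pC, List.find?_cons, Option.or]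
    · by_cases hC : PySem.Str.isIn "TAG_CLEAR" e.2
      · cases ts <;> cases tc <;>
          simp_all [bGo, ih, pS, pC, List.find?_cons, Option.or]
      · cases ts <;> cases tc <;>
          simp_all [bGo, ih, pS, pC, List.find?_cons, Option.or]

lemma foldA_eq : ∀ (xs : List (Int × String)) (ts tc : Option Int),
    xs.foldl aStep (ts, tc)
      = (((xs.reverse.find? pS).map (·.1)).or ts, ((xs.reverse.find? pC).map (·.1)).or tc) := by
  intro xs
  induction xs with
  | nil => intro ts tc; simp
  | cons e rest ih =>
    intro ts tc
    by_cases hS : PySem.Str.isIn "TAG_SET" e.2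
    · simp only [List.foldl_cons, aStep, hS, if_true, ih, List.reverse_cons, List.find?_append]
      cases hf : rest.reverse.find? pS <;>
        cases hg : rest.reverse.find? pC <;>
        simp_all [pS, pC, Option.or]
    · by_cases hC : PySem.Str.isIn "TAG_CLEAR" e.2
      · simp only [List.foldl_cons, aStep, hS, hC, if_true, ih,
          List.reverse_cons, List.find?_append]
        cases hf : rest.reverse.find? pS <;>
          cases hg : rest.reverse.find? pC <;>
          simp_all [pS, pC, Option.or]
      · simp only [List.foldl_cons, aStep, hS, hC, ih,
          List.reverse_cons, List.find?_append]
        simp_all [pS, pC]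

-- ===== VERDICT (by name: the statement is the Claim_ definition above) =====
theorem extract_tag_times_spec : Claim_equal_extract_tag_times := by
  intro xs _
  show extract_tag_times xs = extract_tag_times_alt xs
  simp [extract_tag_times, extract_tag_times_alt, foldA_eq, bGo_eq]
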